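-- pv_equiv track=rewrite | github.com/Matteo-Candi/Master-Thesis | benchmark/Python_formatted.py | lexicographically_smallest_string
-- ===== SOURCE A (Python) =====
-- def lexicographically_smallest_string(s, n):
--     last_ze = - 1
--     ans = ""
--     for i in range(n - 1, - 1, - 1):
--         if s[i] == '0':
--             last_ze = i
--             break
--     for i in range(n):
--         if i <= last_ze and s[i] == '0':
--             ans += s[i]
--         elif i > last_ze:
--             ans += s[i]
--     return ans
-- ===== SOURCE B (Python) =====
-- def lexicographically_smallest_string(s, n):
--     zeros = 0
--     tail = []
--     for c in s[:max(n, 0)]: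
--         if c == '0':
--             zeros += 1
--             tail = []
--         else:
--             tail.append(c)
--     return '0' * zeros + ''.join(tail)
-- ===== Notes on version B (the rewrite author's own statement) =====
-- stated objective: simpler
-- what changed: Replaces the two index loops (a backwards scan for the last '0' plus an index-conditional rebuild) by a single value-based pass over the first max(n,0) characters that counts zeros and resets a tail buffer at each '0', then builds the result as '0'*zeros + tail.
import Mathlib
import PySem

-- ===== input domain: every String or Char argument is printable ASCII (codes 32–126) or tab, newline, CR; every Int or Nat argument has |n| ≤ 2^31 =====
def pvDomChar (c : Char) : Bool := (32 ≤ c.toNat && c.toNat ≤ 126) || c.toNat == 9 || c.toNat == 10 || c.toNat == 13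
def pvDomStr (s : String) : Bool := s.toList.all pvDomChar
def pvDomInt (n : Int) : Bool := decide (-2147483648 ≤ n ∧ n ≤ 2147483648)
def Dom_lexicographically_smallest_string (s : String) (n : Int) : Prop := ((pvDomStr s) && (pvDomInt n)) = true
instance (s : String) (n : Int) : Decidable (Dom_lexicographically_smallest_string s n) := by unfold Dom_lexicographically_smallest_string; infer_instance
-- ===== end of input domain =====

-- B replaces A's two index loops by one value-based pass (count zeros, reset a tail buffer at each '0'); objective: simpler.

-- ===== PORT A =====
-- A's first loop: scan the (descending) index range, stop at the first i with s[i] == '0'; -1 if none.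
def lexScan (cs : List Char) : List Int → Int
  | [] => -1
  | i :: rest => if PySem.List.pyGetD cs i ' ' = '0' then i else lexScan cs rest

-- A's second-loop body (branches in A's order).
def lexStep (cs : List Char) (last_ze : Int) (ans : List Char) (i : Int) : List Char :=
  if i ≤ last_ze ∧ PySem.List.pyGetD cs i ' ' = '0' then ans ++ [PySem.List.pyGetD cs i ' ']
  else if last_ze < i then ans ++ [PySem.List.pyGetD cs i ' ']
  else ans

def lexicographically_smallest_string (s : String) (n : Int) : String :=
  let cs := s.toList
  let last_ze := lexScan cs (PySem.List.pyRange (n - 1) (-1) (-1))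
  String.ofList ((PySem.List.pyRange 0 n).foldl (lexStep cs last_ze) [])

-- ===== PORT B =====
-- B's loop body: count '0's, reset the tail buffer at each '0'.
def lexBStep (acc : Nat × List Char) (c : Char) : Nat × List Char :=
  if c = '0' then (acc.1 + 1, []) else (acc.1, acc.2 ++ [c])

def lexicographically_smallest_string_alt (s : String) (n : Int) : String :=
  let r := (PySem.List.slice s.toList none (some (max n 0))).foldl lexBStep (0, [])
  String.ofList (List.replicate r.1 '0' ++ r.2)

-- ===== PRECONDITION & SPEC =====
-- Pre_ excludes exactly n > len(s), where A raises IndexError (s[n-1] in its backwards scan).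
def Pre_lexicographically_smallest_string (s : String) (n : Int) : Prop :=
  n ≤ (s.toList.length : Int)
instance (s : String) (n : Int) : Decidable (Pre_lexicographically_smallest_string s n) := by
  unfold Pre_lexicographically_smallest_string; infer_instance
def pvWitness_lexicographically_smallest_string : String × Int := ("1010ab", 6)


def Spec_lexicographically_smallest_string (s : String) (n : Int) (out : String) : Prop :=
  out = lexicographically_smallest_string_alt s n
instance (s : String) (n : Int) (out : String) : Decidable (Spec_lexicographically_smallest_string s n out) := by
  unfold Spec_lexicographically_smallest_string; infer_instance

-- ===== CLAIM (what is proved, stated in full; the proofs are below) =====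
def Claim_equal_lexicographically_smallest_string : Prop :=
  ∀ (s : String) (n : Int), Dom_lexicographically_smallest_string s n →
    Pre_lexicographically_smallest_string s n →
    Spec_lexicographically_smallest_string s n (lexicographically_smallest_string s n)


-- ===== LEMMAS AND PROOFS =====


-- Abbreviations for the proof.
def lexScanN (cs : List Char) (m : Nat) : Int :=
  lexScan cs (PySem.List.pyRange ((m : Int) - 1) (-1) (-1))

def lexAout (cs : List Char) (r : Int) (m : Nat) : List Char :=
  (PySem.List.pyRange 0 (m : Int)).foldl (lexStep cs r) []

lemma take_succ_getD (cs : List Char) (m : Nat) (h : m < cs.length) :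
    cs.take (m + 1) = cs.take m ++ [cs.getD m ' '] := by
  rw [List.take_add_one, List.getElem?_eq_getElem h]
  simp [List.getD_eq_getElem?_getD, List.getElem?_eq_getElem h]

lemma lexScanN_zero (cs : List Char) : lexScanN cs 0 = -1 := by
  simp [lexScanN, PySem.List.pyRange_neg_one_eq_nil, lexScan]

lemma lexScanN_succ (cs : List Char) (m : Nat) :
    lexScanN cs (m + 1) =
      if cs.getD m ' ' = '0' then (m : Int) else lexScanN cs m := by
  unfold lexScanN
  have h1 : ((m : Int) + 1 - 1) = (m : Int) := by ring
  have h2 : (-1 : Int) < (m : Int) := by omega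
  rw [show ((m + 1 : Nat) : Int) = (m : Int) + 1 by push_cast; ring, h1,
      PySem.List.pyRange_neg_one_cons h2]
  simp [lexScan, PySem.List.pyGetD_natCast]

lemma lexScanN_lt (cs : List Char) (m : Nat) : lexScanN cs m < (m : Int) := by
  induction m with
  | zero => rw [lexScanN_zero]; decide
  | succ m ih =>
    rw [lexScanN_succ]
    split_ifs <;> push_cast <;> omega

lemma lexAout_zero (cs : List Char) (r : Int) : lexAout cs r 0 = [] := by
  simp [lexAout, PySem.List.pyRange_one_eq_nil]

lemma lexAout_succ (cs : List Char) (r : Int) (m : Nat) :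
    lexAout cs r (m + 1) = lexStep cs r (lexAout cs r m) (m : Int) := by
  unfold lexAout
  rw [show ((m + 1 : Nat) : Int) = (m : Int) + 1 by push_cast; ring,
      PySem.List.pyRange_one_succ_right (Int.natCast_nonneg m), List.foldl_append]
  simp

-- A's second loop when every index is ≤ r: it keeps exactly the '0's.
lemma lexAout_all_le (cs : List Char) (r : Int) :
    ∀ m : Nat, m ≤ cs.length → (m : Int) ≤ r + 1 →
      lexAout cs r m = (cs.take m).filter (fun c => c == '0') := by
  intro m
  induction m with
  | zero => intro _ _; simp [lexAout_zero]
  | succ m ih =>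
    intro hm hr
    have hmlt : m < cs.length := by omega
    have hle : (m : Int) ≤ r := by push_cast at hr ⊢; omega
    rw [lexAout_succ, lexStep, PySem.List.pyGetD_natCast,
        take_succ_getD cs m hmlt, List.filter_append,
        ih (by omega) (by push_cast at hr ⊢; omega)]
    by_cases h0 : cs.getD m ' ' = '0'
    all_goals rw [List.getD_eq_getElem?_getD] at h0
    · simp [h0, hle]
    · simp [h0, not_lt.mpr hle]

lemma lexAout_succ_gt (cs : List Char) (r : Int) (m : Nat)
    (hr : r < (m : Int)) :
    lexAout cs r (m + 1) = lexAout cs r m ++ [cs.getD m ' '] := by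
  rw [lexAout_succ, lexStep, PySem.List.pyGetD_natCast]
  simp [not_le.mpr hr, hr]

lemma lexBfold_fst :
    ∀ (l : List Char) (z : Nat) (t : List Char),
      (l.foldl lexBStep (z, t)).1 = z + l.count '0' := by
  intro l
  induction l with
  | nil => intro z t; simp
  | cons c l ih =>
    intro z t
    by_cases h0 : c = '0'
    · simp [lexBStep, h0, ih]; omega
    · simp only [List.foldl_cons, lexBStep, if_neg h0, ih]
      simp [h0]

-- Main invariant: A's output equals B's output on the first m characters.
lemma lex_main (cs : List Char) :
    ∀ m : Nat, m ≤ cs.length →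
      lexAout cs (lexScanN cs m) m =
        List.replicate ((cs.take m).foldl lexBStep (0, [])).1 '0' ++
          ((cs.take m).foldl lexBStep (0, [])).2 := by
  intro m
  induction m with
  | zero => intro _; simp [lexAout_zero]
  | succ m ih =>
    intro hm
    have hmlt : m < cs.length := by omega
    rw [take_succ_getD cs m hmlt, List.foldl_append, List.foldl_cons, List.foldl_nil]
    by_cases h0 : cs.getD m ' ' = '0'
    · rw [lexScanN_succ, if_pos h0,
          lexAout_all_le cs (m : Int) (m + 1) hm (by push_cast; omega),
          take_succ_getD cs m hmlt, List.filter_append,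
          List.filter_beq '0', lexBStep, if_pos h0]
      have hz := lexBfold_fst (cs.take m) 0 []
      rw [List.getD_eq_getElem?_getD] at h0
      simp [h0, hz, List.replicate_succ']
    · rw [lexScanN_succ, if_neg h0,
          lexAout_succ_gt cs (lexScanN cs m) m (lexScanN_lt cs m),
          ih (by omega), lexBStep, if_neg h0]
      simp [List.append_assoc]

-- ===== VERDICT (by name: the statement is the Claim_ definition above) =====
theorem lexicographically_smallest_string_spec : Claim_equal_lexicographically_smallest_string := by
  intro s n _ hle
  unfold Pre_lexicographically_smallest_string at hle
  unfold Spec_lexicographically_smallest_string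
  simp only [lexicographically_smallest_string, lexicographically_smallest_string_alt]
  by_cases h0 : 0 ≤ n
  · obtain ⟨m, rfl⟩ : ∃ m : Nat, n = (m : Int) := ⟨n.toNat, (Int.toNat_of_nonneg h0).symm⟩
    have hm : m ≤ s.toList.length := by exact_mod_cast hle
    have key := lex_main s.toList m hm
    simp only [lexAout, lexScanN] at key
    rw [show max ((m : Nat) : Int) 0 = ((m : Nat) : Int) from max_eq_left h0,
        PySem.List.slice_to s.toList (Int.natCast_nonneg m), Int.toNat_natCast, key]
  · have hneg : n ≤ 0 := by omega
    rw [show max n 0 = 0 from max_eq_right hneg,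
        PySem.List.slice_to s.toList le_rfl,
        PySem.List.pyRange_one_eq_nil hneg]
    simp
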